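-- pv_equiv track=rewrite | github.com/julianespinel/website | deploy.py | __get_updated_version
-- ===== SOURCE A (Python) =====
-- from enum import IntEnum
--
-- class VersionPart(IntEnum):
--     MAJOR = 0
--     MINOR = 1
--     PATCH = 2
--
--     @staticmethod
--     def fromstr(string):
--         return VersionPart[string.upper()]
--
-- def __get_updated_version(current_version: str, part_to_increase: VersionPart) -> str:
--     parts = current_version.split('.')
--
--     new_version = ""
--     for index, part in enumerate(parts):
--         if index < part_to_increase:
--             # Preserve all numbers before the part we want to increase
--             new_version += f'{part}.'
--         elif index == part_to_increase:
--             # Increase the number of part we want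
--             number = int(part)
--             increased_part = number + 1
--             new_version += f'{increased_part}.'
--         else:
--             # Set to 0 all the parts after the part we want to increase
--             new_version += '0.'
--
--     # Remove last extra dot
--     fixed_version = new_version[:-1]
--     return fixed_version
-- ===== SOURCE B (Python) =====
-- def __get_updated_version(current_version: str, part_to_increase) -> str:
--     parts = current_version.split('.')
--     idx = int(part_to_increase)
--     if idx < len(parts):
--         parts = parts[:idx] + [str(int(parts[idx]) + 1)] + ['0'] * (len(parts) - idx - 1)
--     return '.'.join(parts)
-- ===== Notes on version B (the rewrite author's own statement) =====
-- stated objective: simpler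
-- what changed: Replaces A's enumerate loop with three index branches plus a trailing-dot strip by a direct rebuild of the parts list (slice before idx, incremented element, '0' padding) joined with '.'; Pre_ restricts part_to_increase to the natural VersionPart domain (nonnegative), since the caller's IntEnum is 0/1/2 and A's all-zeros output on a negative index is accidental, and excludes inputs where int(part) raises ValueError.
-- outside the precondition, e.g. on __get_updated_version('1.2.3', -1): A returns '0.0.0', B returns '1.2.4.0.0.0'
import Mathlib
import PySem

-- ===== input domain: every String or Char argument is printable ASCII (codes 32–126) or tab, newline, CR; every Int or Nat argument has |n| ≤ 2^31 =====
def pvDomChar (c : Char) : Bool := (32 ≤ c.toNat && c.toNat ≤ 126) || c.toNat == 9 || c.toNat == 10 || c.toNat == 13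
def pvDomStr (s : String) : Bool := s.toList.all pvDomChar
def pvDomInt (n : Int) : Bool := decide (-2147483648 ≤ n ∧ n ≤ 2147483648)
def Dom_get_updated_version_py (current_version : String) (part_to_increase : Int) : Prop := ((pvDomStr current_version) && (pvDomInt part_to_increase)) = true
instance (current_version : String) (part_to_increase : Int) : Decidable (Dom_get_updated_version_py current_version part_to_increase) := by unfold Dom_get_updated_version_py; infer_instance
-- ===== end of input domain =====

-- B rebuilds the parts list by slicing instead of A's three-branch loop; simpler, same cost.
-- String concatenation is modeled on code points (List Char); int(part) is ported with ofStr?,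
-- whose failure (ValueError) is excluded by Pre_get_updated_version_py.

-- ===== PORT A =====
-- A's loop body, named (the `+=` branches on the enumerate index)
def pvStepA (pt : Int) (acc : List Char) (ip : Int × String) : List Char :=
  if ip.1 < pt then acc ++ ip.2.toList ++ ['.']
  else if ip.1 = pt then
    acc ++ (PySem.Int.toStr ((PySem.Int.ofStr? ip.2).getD 0 + 1)).toList ++ ['.']
  else acc ++ ['0', '.']

def get_updated_version_py (current_version : String) (part_to_increase : Int) : String :=
  let parts := (PySem.Str.split? current_version ".").getD []  -- sep "." ≠ "" so split? never returns none
  let new_version : List Char :=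
    (PySem.List.enumerate parts).foldl (pvStepA part_to_increase) []
  String.ofList (PySem.List.slice new_version none (some (-1)))  -- new_version[:-1]

-- ===== PORT B =====
def get_updated_version_py_alt (current_version : String) (part_to_increase : Int) : String :=
  let parts := (PySem.Str.split? current_version ".").getD []  -- sep "." ≠ "" so split? never returns none
  let idx := part_to_increase
  let parts' :=
    if idx < PySem.List.len parts then
      PySem.List.slice parts none (some idx)
        ++ [PySem.Int.toStr ((PySem.Int.ofStr? (PySem.List.pyGetD parts idx "")).getD 0 + 1)]
        ++ PySem.List.pyRepeat ["0"] (PySem.List.len parts - idx - 1)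
    else parts
  PySem.Str.join "." parts'

-- ===== PRECONDITION & SPEC =====
-- Pre_ restricts part_to_increase to the natural VersionPart domain (the caller's IntEnum only
-- has values 0/1/2, so a negative index never arises and A's all-zeros output there is accidental),
-- and excludes the inputs where Python's int(part) raises ValueError.
def Pre_get_updated_version_py (current_version : String) (part_to_increase : Int) : Prop :=
  0 ≤ part_to_increase ∧
  (let parts := (PySem.Str.split? current_version ".").getD []
   part_to_increase < (parts.length : Int) →
     PySem.Int.ofStr? (PySem.List.pyGetD parts part_to_increase "") ≠ none)

instance (current_version : String) (part_to_increase : Int) : Decidable (Pre_get_updated_version_py current_version part_to_increase) := by unfold Pre_get_updated_version_py; infer_instance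

def pvWitness_get_updated_version_py : String × Int := ("1.2.3", 1)

def Spec_get_updated_version_py (current_version : String) (part_to_increase : Int) (out : String) : Prop := out = get_updated_version_py_alt current_version part_to_increase
instance (current_version : String) (part_to_increase : Int) (out : String) : Decidable (Spec_get_updated_version_py current_version part_to_increase out) := by unfold Spec_get_updated_version_py; infer_instance

-- ===== CLAIM (what is proved, stated in full; the proofs are below) =====
def Claim_equal_get_updated_version_py : Prop := ∀ (current_version : String) (part_to_increase : Int), Dom_get_updated_version_py current_version part_to_increase → Pre_get_updated_version_py current_version part_to_increase → Spec_get_updated_version_py current_version part_to_increase (get_updated_version_py current_version part_to_increase)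

-- ===== LEMMAS AND PROOFS =====
def pvPartDot (p : String) : List Char := p.toList ++ ['.']

lemma pvJoinChars (l : List String) :
    PySem.Chars.join ['.'] (l.map String.toList) = (l.flatMap pvPartDot).dropLast := by
  induction l with
  | nil => simp [PySem.Chars.join_nil]
  | cons p r ih =>
    cases r with
    | nil => simp [PySem.Chars.join_singleton, pvPartDot]
    | cons q r' =>
      have hne : ((q :: r').flatMap pvPartDot) ≠ [] := by
        simp [List.flatMap_cons, pvPartDot]
      rw [List.map_cons, List.map_cons, PySem.Chars.join_cons_cons, ← List.map_cons, ih,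
        show (p :: q :: r').flatMap pvPartDot = pvPartDot p ++ (q :: r').flatMap pvPartDot from by simp,
        List.dropLast_append_of_ne_nil hne, pvPartDot]

lemma pvJoin_eq_dropLast (l : List String) :
    (PySem.Str.join "." l).toList = (l.flatMap pvPartDot).dropLast := by
  rw [← pvJoinChars]; simp [pysem]

lemma pvFoldA_low (pt : Int) (parts : List String) (s : Int) (acc : List Char)
    (h : s + parts.length ≤ pt) :
    (PySem.List.enumerate parts s).foldl (pvStepA pt) acc
      = acc ++ parts.flatMap pvPartDot := by
  induction parts generalizing s acc with
  | nil => simp [PySem.List.enumerate_nil]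
  | cons p r ih =>
    rw [PySem.List.enumerate_cons, List.foldl_cons]
    have hs : s < pt := by simp at h; omega
    have hstep : pvStepA pt acc (s, p) = acc ++ p.toList ++ ['.'] := by
      simp [pvStepA, hs]
    rw [hstep, ih (s + 1) _ (by simp at h ⊢; omega)]
    simp [pvPartDot]

lemma pvFoldA_high (pt : Int) (parts : List String) (s : Int) (acc : List Char)
    (h : pt < s) :
    (PySem.List.enumerate parts s).foldl (pvStepA pt) acc
      = acc ++ (List.replicate parts.length "0").flatMap pvPartDot := by
  induction parts generalizing s acc with
  | nil => simp [PySem.List.enumerate_nil]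
  | cons p r ih =>
    rw [PySem.List.enumerate_cons, List.foldl_cons]
    have hstep : pvStepA pt acc (s, p) = acc ++ ['0', '.'] := by
      have h1 : ¬ s < pt := by omega
      have h2 : ¬ s = pt := by omega
      simp [pvStepA, h1, h2]
    rw [hstep, ih (s + 1) _ (by omega)]
    simp [pvPartDot, List.replicate_succ]

lemma pvFoldA_mid (pt : Int) (parts : List String) (s : Int) (acc : List Char)
    (h1 : s ≤ pt) (h2 : pt < s + parts.length) :
    (PySem.List.enumerate parts s).foldl (pvStepA pt) acc
      = acc ++ (parts.take (pt - s).toNat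
          ++ [PySem.Int.toStr ((PySem.Int.ofStr? (parts.getD (pt - s).toNat "")).getD 0 + 1)]
          ++ List.replicate (parts.length - (pt - s).toNat - 1) "0").flatMap pvPartDot := by
  induction parts generalizing s acc with
  | nil => simp at h2; omega
  | cons p r ih =>
    rw [PySem.List.enumerate_cons, List.foldl_cons]
    by_cases hs : s = pt
    · subst hs
      have hstep : pvStepA s acc (s, p)
          = acc ++ (PySem.Int.toStr ((PySem.Int.ofStr? p).getD 0 + 1)).toList ++ ['.'] := by
        simp [pvStepA]
      rw [hstep, pvFoldA_high s r (s + 1) _ (by omega)]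
      simp [pvPartDot]
    · have hs' : s < pt := lt_of_le_of_ne h1 hs
      have hstep : pvStepA pt acc (s, p) = acc ++ p.toList ++ ['.'] := by
        simp [pvStepA, hs']
      have hn : (pt - s).toNat = (pt - (s + 1)).toNat + 1 := by omega
      rw [hstep, ih (s + 1) _ (by omega) (by simp at h2 ⊢; omega)]
      rw [hn]
      simp [List.take_succ_cons, pvPartDot]

theorem main (current_version : String) (part_to_increase : Int)
    (hpre : Pre_get_updated_version_py current_version part_to_increase) :
    get_updated_version_py current_version part_to_increase
      = get_updated_version_py_alt current_version part_to_increase := by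
  obtain ⟨h0, _⟩ := hpre
  rw [get_updated_version_py, get_updated_version_py_alt]
  set parts := (PySem.Str.split? current_version ".").getD [] with hparts
  apply String.toList_inj.mp
  rw [PySem.List.slice_to_neg_one, String.toList_ofList, pvJoin_eq_dropLast]
  by_cases hlt : part_to_increase < PySem.List.len parts
  · have hlt' : part_to_increase < (parts.length : Int) := by simpa using hlt
    rw [if_pos hlt,
      pvFoldA_mid part_to_increase parts 0 [] h0 (by simpa using hlt'),
      PySem.List.slice_to parts h0,
      PySem.List.pyGetD_eq_getElem parts "" h0 hlt',
      PySem.List.pyRepeat_singleton]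
    have e1 : ((PySem.List.len parts - part_to_increase - 1)).toNat
        = parts.length - (part_to_increase - 0).toNat - 1 := by
      simp only [PySem.List.len_eq]; omega
    have e2 : parts.getD (part_to_increase - 0).toNat "" = parts[part_to_increase.toNat] := by
      rw [List.getD_eq_getElem _ _ (by omega)]
      congr 1; omega
    have e3 : (part_to_increase - 0).toNat = part_to_increase.toNat := by omega
    rw [e2, e1, e3]
    simp
  · rw [if_neg hlt, pvFoldA_low part_to_increase parts 0 [] (by simp at hlt ⊢; omega)]
    simp

-- ===== VERDICT (by name: the statement is the Claim_ definition above) =====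
theorem get_updated_version_py_spec : Claim_equal_get_updated_version_py := by
  intro cv pt _ hpre
  unfold Spec_get_updated_version_py
  exact main cv pt hpre
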